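-- pv_equiv track=rewrite | github.com/codingNoob12/algorithm-study | python/BOJ/bronze1/2022-12-09/1652.py | count
-- ===== SOURCE A (Python) =====
-- def count(st: str):
--     st += 'X'
--     i, pre, cnt = -1, 0, 0
--     while True:
--         i = st.find('X', i + 1)
--         if i == -1:
--             if '..' in st[pre:]:
--                 cnt += 1
--             break
--         if '..' in st[pre:i]:
--             cnt += 1
--         pre = i + 1
--     return cnt
-- ===== SOURCE B (Python) =====
-- def count(st: str):
--     cnt = 0
--     prev = 'X'
--     counted = False
--     for c in st:
--         if c == 'X':
--             prev, counted = 'X', False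
--         else:
--             if prev == '.' and c == '.' and not counted:
--                 cnt += 1
--                 counted = True
--             prev = c
--     return cnt
-- ===== Notes on version B (the rewrite author's own statement) =====
-- stated objective: simpler
-- what changed: Replaced the find/slice loop that extracts each X-delimited segment and substring-searches it for a double dot with a single character-by-character state machine (previous char plus a per-segment counted flag), with no sentinel append and no substring searches.
import Mathlib
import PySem

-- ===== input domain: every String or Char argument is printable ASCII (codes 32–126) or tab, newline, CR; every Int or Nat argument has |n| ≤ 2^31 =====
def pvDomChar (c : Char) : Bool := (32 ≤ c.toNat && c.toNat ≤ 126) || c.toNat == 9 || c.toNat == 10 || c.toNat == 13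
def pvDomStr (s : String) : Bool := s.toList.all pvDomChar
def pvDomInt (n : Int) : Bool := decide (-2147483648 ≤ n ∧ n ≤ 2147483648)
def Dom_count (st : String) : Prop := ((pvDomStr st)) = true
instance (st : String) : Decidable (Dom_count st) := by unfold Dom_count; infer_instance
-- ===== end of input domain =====

-- B replaces A's find/slice segment loop by a one-pass state machine over the characters; objective: simpler.

-- ===== PORT A =====
-- A's `while True` loop over `i = st.find('X', i+1)`; the fuel argument only makes the
-- recursion structural and is never exhausted (the find position strictly increases).
def countGoA (fuel : Nat) (s : List Char) (i pre cnt : Int) : Int :=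
  match fuel with
  | 0 => cnt
  | fuel + 1 =>
    let j := PySem.Chars.findFrom s ['X'] (i + 1)
    if j == -1 then
      cnt + (if PySem.Chars.isIn ['.', '.'] (PySem.Chars.slice s (some pre) none) then 1 else 0)
    else
      countGoA fuel s j (j + 1)
        (cnt + (if PySem.Chars.isIn ['.', '.'] (PySem.Chars.slice s (some pre) (some j)) then 1 else 0))

def count (st : String) : Int :=
  countGoA (st.toList.length + 2) (st.toList ++ ['X']) (-1) 0 0

-- ===== PORT B =====
def countGoB (l : List Char) (prev : Char) (counted : Bool) (cnt : Int) : Int :=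
  match l with
  | [] => cnt
  | c :: rest =>
    if c = 'X' then countGoB rest 'X' false cnt
    else if prev = '.' && c = '.' && !counted then countGoB rest c true (cnt + 1)
    else countGoB rest c counted cnt

def count_alt (st : String) : Int := countGoB st.toList 'X' false 0

-- ===== PRECONDITION & SPEC =====
def Spec_count (st : String) (out : Int) : Prop := out = count_alt st
instance (st : String) (out : Int) : Decidable (Spec_count st out) := by unfold Spec_count; infer_instance

-- ===== CLAIM (what is proved, stated in full; the proofs are below) =====
def Claim_equal_count : Prop := ∀ (st : String), Dom_count st → Spec_count st (count st)

-- ===== LEMMAS AND PROOFS =====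

-- proof-side segmentation of the character list at 'X' (like str.split('X'))
def segs : List Char → List (List Char)
  | [] => [[]]
  | c :: rest =>
    if c = 'X' then [] :: segs rest
    else
      match segs rest with
      | s :: ss => (c :: s) :: ss
      | [] => [[c]]

def pred (seg : List Char) : Bool := PySem.Chars.isIn ['.', '.'] seg

def P (l : List Char) : Int := ((segs l).countP pred : Nat)

lemma segs_ne_nil (l : List Char) : segs l ≠ [] := by
  cases l with
  | nil => simp [segs]
  | cons c rest =>
    simp only [segs]
    split
    · simp
    · cases h : segs rest <;> simp

lemma segs_no_X (l : List Char) (h : 'X' ∉ l) : segs l = [l] := by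
  induction l with
  | nil => rfl
  | cons c rest ih =>
    have hc : ¬ c = 'X' := fun hc => h (hc ▸ List.mem_cons_self)
    have hr : 'X' ∉ rest := fun hm => h (List.mem_cons_of_mem _ hm)
    simp [segs, hc, ih hr]

lemma segs_split (l : List Char) (m : Nat) (hm : 'X' ∉ l.take m)
    (hd : ['X'] <+: l.drop m) : segs l = l.take m :: segs (l.drop (m + 1)) := by
  induction m generalizing l with
  | zero =>
    cases l with
    | nil => simp at hd
    | cons c rest =>
      obtain ⟨t, ht⟩ := hd
      simp only [List.drop_zero] at ht
      cases ht
      simp [segs]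
  | succ m ih =>
    cases l with
    | nil => simp at hd
    | cons c rest =>
      have hc : ¬ c = 'X' := by
        intro hc; exact hm (by simp [hc, List.take_succ_cons])
      have hm' : 'X' ∉ rest.take m := by
        intro h; exact hm (by simp [List.take_succ_cons, h])
      have := ih rest hm' (by simpa using hd)
      simp [segs, hc, this]

lemma P_no_X (l : List Char) (h : 'X' ∉ l) : P l = if pred l then 1 else 0 := by
  simp [P, segs_no_X l h, List.countP]
  split <;> simp_all [List.countP.go]

lemma pred_nil : pred [] = false := by decide

lemma pred_cons (c : Char) (s : List Char) :
    (pred (c :: s) = true) ↔ (c = '.' ∧ s.head? = some '.') ∨ pred s = true := by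
  simp only [pred, PySem.Chars.isIn_iff_infix, List.infix_cons_iff]
  constructor
  · rintro (⟨t, ht⟩ | h)
    · obtain ⟨rfl, rfl⟩ : c = '.' ∧ s = '.' :: t := by
        injection ht with h1 h2; exact ⟨h1.symm, h2.symm⟩
      exact Or.inl ⟨rfl, rfl⟩
    · exact Or.inr h
  · rintro (⟨rfl, hh⟩ | h)
    · cases s with
      | nil => simp at hh
      | cons d t =>
        simp only [List.head?_cons, Option.some.injEq] at hh
        exact Or.inl ⟨t, by simp [hh]⟩
    · exact Or.inr h

lemma countP_cons_int (x : List Char) (xs : List (List Char)) :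
    (((x :: xs).countP pred : Nat) : Int)
      = (if pred x then 1 else 0) + ((xs.countP pred : Nat) : Int) := by
  rw [List.countP_cons]
  split
  · simp_all; ring
  · simp_all

-- the main invariant of A's loop: with i = k-1, pre = k it counts the segments of drop k
lemma goA_eq (fuel : Nat) (s : List Char) (k : Nat) (cnt : Int)
    (hk : k ≤ s.length) (hfuel : s.length - k < fuel) :
    countGoA fuel s ((k : Int) - 1) (k : Int) cnt = cnt + P (s.drop k) := by
  induction fuel generalizing k cnt with
  | zero => omega
  | succ fuel ih =>
    have harg : ((k : Int) - 1) + 1 = (k : Int) := by ring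
    simp only [countGoA, harg, PySem.Chars.findFrom_natCast s ['X'] k hk]
    by_cases hfind : PySem.Chars.find (List.drop k s) ['X'] = -1
    · have hnoX : 'X' ∉ s.drop k := by
        have := (PySem.Chars.find_eq_neg_one_iff (List.drop k s) ['X']).mp hfind
        simpa [List.singleton_infix_iff] using this
      simp only [hfind, beq_self_eq_true, if_pos,
        PySem.Chars.slice_eq_listSlice, PySem.List.slice_from_natCast]
      rw [P_no_X _ hnoX]
      simp [pred]
    · have hge : 0 ≤ PySem.Chars.find (List.drop k s) ['X'] := by
        have := PySem.Chars.neg_one_le_find (List.drop k s) ['X']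
        omega
      set f := PySem.Chars.find (List.drop k s) ['X'] with hf
      have ⟨hpre, hmin⟩ := PySem.Chars.find_spec (s := List.drop k s) (sub := ['X']) hge
      set m : Nat := f.toNat with hmdef
      have hfm : f = (m : Int) := by omega
      -- the found 'X' is a real position: m < (drop k s).length
      have hmlt : k + m < s.length := by
        obtain ⟨t, ht⟩ := hpre
        have h1 : (List.drop m (List.drop k s)).length = t.length + 1 := by
          rw [← ht]; simp
        simp only [List.length_drop] at h1
        omega
      have hklen : k + m + 1 ≤ s.length := by omega
      -- no 'X' in the segment before position m
      have hnoX : 'X' ∉ (List.drop k s).take m := by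
        intro hmem
        obtain ⟨i, hi, hgi⟩ := List.mem_iff_getElem.mp hmem
        have hi' : i < m := by simpa using hi.trans_le (List.length_take_le _ _)
        apply hmin i hi'
        have hilen : i < (List.drop k s).length := by
          simp only [List.length_drop]; omega
        have hx : (List.drop k s)[i]'hilen = 'X' := by
          simpa [List.getElem_take] using hgi
        have hcd : (List.drop k s)[i]'hilen :: List.drop (i + 1) (List.drop k s)
            = List.drop i (List.drop k s) := List.getElem_cons_drop hilen
        rw [hx] at hcd
        exact ⟨_, hcd⟩
      have hjne : ¬ ((k : Int) + f == -1) = true := by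
        simp only [beq_iff_eq]; omega
      simp only [hfind, hjne, if_neg, Bool.false_eq_true, not_false_eq_true]
      have hslice : PySem.Chars.slice s (some (k : Int)) (some ((k : Int) + f))
          = (List.drop k s).take m := by
        rw [hfm, PySem.Chars.slice_eq_listSlice, PySem.List.slice_natCast_add]
      have hstep : (k : Int) + f = ((k + m + 1 : Nat) : Int) - 1 := by push_cast; omega
      have hfix : ((k + m + 1 : Nat) : Int) - 1 + 1 = ((k + m + 1 : Nat) : Int) := by ring
      rw [hslice, hstep, hfix]
      rw [ih (k + m + 1) _ hklen (by omega)]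
      have hsegs : segs (List.drop k s)
          = (List.drop k s).take m :: segs (s.drop (k + m + 1)) := by
        have hidx : k + (m + 1) = k + m + 1 := by omega
        rw [segs_split (List.drop k s) m hnoX hpre, List.drop_drop, hidx]
      have : P (List.drop k s)
          = (if pred ((List.drop k s).take m) then 1 else 0) + P (s.drop (k + m + 1)) := by
        rw [P, hsegs, countP_cons_int]; rfl
      rw [this]
      simp [pred]
      split <;> ring

lemma P_append_X (l : List Char) : P (l ++ ['X']) = P l := by
  have hsegs : ∀ l : List Char, segs (l ++ ['X']) = segs l ++ [[]] := by
    intro l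
    induction l with
    | nil => rfl
    | cons c rest ih =>
      by_cases hc : c = 'X'
      · simp [segs, hc, ih]
      · simp only [List.cons_append, segs, if_neg hc, ih]
        obtain ⟨x, xs, hx⟩ := List.exists_cons_of_ne_nil (segs_ne_nil rest)
        rw [hx]
        simp
  simp [P, hsegs, List.countP_append, pred_nil]

-- B's state machine, expressed over the first segment and the remaining segments
def g (seg : List Char) (prev : Char) (counted : Bool) : Int :=
  if counted then 0
  else if pred seg = true ∨ (prev = '.' ∧ seg.head? = some '.') then 1 else 0

lemma goB_eq (l : List Char) : ∀ (prev : Char) (counted : Bool) (cnt : Int),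
    countGoB l prev counted cnt
      = cnt + g (segs l).headI prev counted + (((segs l).tail.countP pred : Nat) : Int) := by
  induction l with
  | nil => intro prev counted cnt; simp [countGoB, segs, g, pred_nil]
  | cons c rest ih =>
    intro prev counted cnt
    by_cases hc : c = 'X'
    · subst hc
      have hstep : countGoB ('X' :: rest) prev counted cnt = countGoB rest 'X' false cnt := by
        simp [countGoB]
      have hsegs : segs ('X' :: rest) = [] :: segs rest := by simp [segs]
      rw [hstep, ih, hsegs]
      obtain ⟨x, xs, hx⟩ := List.exists_cons_of_ne_nil (segs_ne_nil rest)
      rw [hx]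
      simp only [List.headI_cons, List.tail_cons]
      rw [countP_cons_int]
      have h1 : g x 'X' false = if pred x then 1 else 0 := by
        simp only [g, if_neg (Bool.false_ne_true)]
        congr 1
        simp only [eq_iff_iff, or_iff_left_iff_imp]
        rintro ⟨h, -⟩
        exact absurd h (by decide)
      have h2 : g [] prev counted = 0 := by simp [g, pred_nil]
      rw [h1, h2]
      ring
    · obtain ⟨x, xs, hx⟩ := List.exists_cons_of_ne_nil (segs_ne_nil rest)
      have hsegs : segs (c :: rest) = (c :: x) :: xs := by
        simp [segs, hc, hx]
      by_cases hb : (prev = '.' && c = '.' && !counted) = true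
      · obtain ⟨⟨hp, hcd⟩, hcnt⟩ : (prev = '.' ∧ c = '.') ∧ counted = false := by
          simpa [Bool.and_eq_true] using hb
        simp only [countGoB, if_neg hc, if_pos hb, ih, hx, hsegs, List.headI_cons,
          List.tail_cons]
        have h1 : g x c true = 0 := by simp [g]
        have h2 : g (c :: x) prev counted = 1 := by
          simp [g, hcnt, hp, hcd]
        rw [h1, h2]; ring
      · simp only [countGoB, if_neg hc, if_neg hb, ih, hx, hsegs, List.headI_cons,
          List.tail_cons]
        have hg : g (c :: x) prev counted = g x c counted := by
          cases counted with
          | true => simp [g]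
          | false =>
            have hnp : ¬ (prev = '.' ∧ c = '.') := by
              intro ⟨h1, h2⟩
              exact hb (by simp [h1, h2])
            simp only [g, if_neg (Bool.false_ne_true)]
            congr 1
            rw [eq_iff_iff, pred_cons, List.head?_cons]
            simp only [Option.some.injEq]
            tauto
        rw [hg]

lemma count_alt_eq_P (st : String) : count_alt st = P st.toList := by
  rw [count_alt, goB_eq]
  obtain ⟨x, xs, hx⟩ := List.exists_cons_of_ne_nil (segs_ne_nil st.toList)
  rw [P, hx]
  simp only [List.headI_cons, List.tail_cons]
  rw [countP_cons_int]
  have : g x 'X' false = if pred x then 1 else 0 := by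
    simp only [g, if_neg (Bool.false_ne_true)]
    congr 1
    simp only [eq_iff_iff, or_iff_left_iff_imp]
    rintro ⟨h, -⟩
    exact absurd h (by decide)
  rw [this]; ring

-- ===== VERDICT (by name: the statement is the Claim_ definition above) =====
theorem count_spec : Claim_equal_count := by
  intro st _
  show count st = count_alt st
  rw [count, count_alt_eq_P]
  have h0 : (0 : Int) = ((0 : Nat) : Int) - 1 + 1 := by ring
  have := goA_eq (st.toList.length + 2) (st.toList ++ ['X']) 0 0 (by simp) (by simp)
  simp only [Nat.cast_zero, zero_sub, List.drop_zero] at this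
  rw [this, P_append_X]
  ring
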